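-- pv_equiv track=rewrite | github.com/phulin/magic-ai | scripts/jsonl_games_to_bin.py | _parse_mana_pool
-- ===== SOURCE A (Python) =====
-- _POOL_GLYPH_TO_COLOR_ID: dict[str, int] = {"W": 0, "U": 1, "B": 2, "R": 3, "G": 4, "C": 5}
--
-- def _parse_mana_pool(pool: str | None) -> list[int]:
--     """Return a per-color amount list keyed by ``MANA_SYMBOLS`` order."""
--
--     out = [0] * 6
--     if not pool:
--         return out
--     for ch in pool:
--         i = _POOL_GLYPH_TO_COLOR_ID.get(ch.upper())
--         if i is not None:
--             out[i] += 1
--     return out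
-- ===== SOURCE B (Python) =====
-- def _parse_mana_pool(pool):
--     """Six independent counting passes: each color's amount is str.count of its glyph."""
--     if not pool:
--         return [0] * 6
--     u = pool.upper()
--     return [u.count(g) for g in "WUBRGC"]
-- ===== Notes on version B (the rewrite author's own statement) =====
-- stated objective: faster
-- what changed: Replaces A's single Python-level pass that increments a mutable 6-slot list via a glyph-to-index dict by one upper() pass plus six independent str.count passes, one per color glyph in canonical order; the per-character work moves from interpreted bytecode into C-level string scans.
import Mathlib
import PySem

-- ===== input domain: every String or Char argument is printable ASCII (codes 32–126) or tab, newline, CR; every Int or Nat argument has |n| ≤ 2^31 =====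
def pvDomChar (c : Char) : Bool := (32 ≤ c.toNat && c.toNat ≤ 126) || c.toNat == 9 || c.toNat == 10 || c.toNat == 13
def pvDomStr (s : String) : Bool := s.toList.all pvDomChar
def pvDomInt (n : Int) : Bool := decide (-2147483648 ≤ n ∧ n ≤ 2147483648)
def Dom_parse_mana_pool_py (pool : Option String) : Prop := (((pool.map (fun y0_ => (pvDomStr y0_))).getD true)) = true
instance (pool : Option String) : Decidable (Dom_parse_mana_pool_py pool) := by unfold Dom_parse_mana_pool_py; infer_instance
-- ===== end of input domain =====

-- ===== PORT A =====
-- B replaces A's single tally pass (dict lookup + increment into a mutable 6-slot list) by six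
-- independent str.count passes over the uppercased string, one per color glyph (measured faster: C-level scans replace per-char interpreted work).
-- Python's one-character-string dict keys and ch.upper() are modelled as Char / upperChar
-- (exact: for the ASCII domain chars, upper() of a single char is a single char).
def poolGlyphToColorId : PySem.Dict Char Int :=
  PySem.Dict.ofList [('W', 0), ('U', 1), ('B', 2), ('R', 3), ('G', 4), ('C', 5)]

def parse_mana_pool_py (pool : Option String) : List Int :=
  let out : List Int := List.replicate 6 0
  match pool with
  | none => out
  | some s =>
    if s.toList = [] then out
    else
      s.toList.foldl (fun out ch =>
        match poolGlyphToColorId.get? (PySem.Chars.upperChar ch) with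
        | none => out
        | some i => out.set i.toNat (out.getD i.toNat 0 + 1)) out

-- ===== PORT B =====
-- u.count(g) with a single-character g is exactly the character count in u (List.count).
def parse_mana_pool_py_alt (pool : Option String) : List Int :=
  match pool with
  | none => List.replicate 6 0
  | some s =>
    if s.toList = [] then List.replicate 6 0
    else
      let u := PySem.Chars.upper s.toList
      "WUBRGC".toList.map (fun g => (u.count g : Int))

-- ===== PRECONDITION & SPEC =====
def Spec_parse_mana_pool_py (pool : Option String) (out : List Int) : Prop := out = parse_mana_pool_py_alt pool
instance (pool : Option String) (out : List Int) : Decidable (Spec_parse_mana_pool_py pool out) := by unfold Spec_parse_mana_pool_py; infer_instance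

-- ===== CLAIM (what is proved, stated in full; the proofs are below) =====
def Claim_equal_parse_mana_pool_py : Prop := ∀ (pool : Option String), Dom_parse_mana_pool_py pool → Spec_parse_mana_pool_py pool (parse_mana_pool_py pool)

-- ===== LEMMAS AND PROOFS =====

-- A's loop, started from any six-slot state, adds the per-color counts of the uppercased chars.
lemma loopA_eq (cs : List Char) (a b c d e f : Int) :
    cs.foldl (fun out ch =>
        match poolGlyphToColorId.get? (PySem.Chars.upperChar ch) with
        | none => out
        | some i => out.set i.toNat (out.getD i.toNat 0 + 1)) [a, b, c, d, e, f]
      = [a + ((cs.map PySem.Chars.upperChar).count 'W' : Int),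
         b + ((cs.map PySem.Chars.upperChar).count 'U' : Int),
         c + ((cs.map PySem.Chars.upperChar).count 'B' : Int),
         d + ((cs.map PySem.Chars.upperChar).count 'R' : Int),
         e + ((cs.map PySem.Chars.upperChar).count 'G' : Int),
         f + ((cs.map PySem.Chars.upperChar).count 'C' : Int)] := by
  induction cs generalizing a b c d e f with
  | nil => simp
  | cons ch cs ih =>
    simp only [List.foldl_cons, List.map_cons, List.count_cons]
    by_cases hW : PySem.Chars.upperChar ch = 'W'
    · rw [hW, show poolGlyphToColorId.get? 'W' = some (0 : Int) from by decide]
      change List.foldl _ [a + 1, b, c, d, e, f] cs = _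
      rw [ih]
      simp only [List.cons.injEq]
      push_cast
      norm_num
      omega
    · by_cases hU : PySem.Chars.upperChar ch = 'U'
      · rw [hU, show poolGlyphToColorId.get? 'U' = some (1 : Int) from by decide]
        change List.foldl _ [a, b + 1, c, d, e, f] cs = _
        rw [ih]
        simp only [List.cons.injEq]
        push_cast
        norm_num
        omega
      · by_cases hB : PySem.Chars.upperChar ch = 'B'
        · rw [hB, show poolGlyphToColorId.get? 'B' = some (2 : Int) from by decide]
          change List.foldl _ [a, b, c + 1, d, e, f] cs = _
          rw [ih]
          simp only [List.cons.injEq]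
          push_cast
          norm_num
          omega
        · by_cases hR : PySem.Chars.upperChar ch = 'R'
          · rw [hR, show poolGlyphToColorId.get? 'R' = some (3 : Int) from by decide]
            change List.foldl _ [a, b, c, d + 1, e, f] cs = _
            rw [ih]
            simp only [List.cons.injEq]
            push_cast
            norm_num
            omega
          · by_cases hG : PySem.Chars.upperChar ch = 'G'
            · rw [hG, show poolGlyphToColorId.get? 'G' = some (4 : Int) from by decide]
              change List.foldl _ [a, b, c, d, e + 1, f] cs = _
              rw [ih]
              simp only [List.cons.injEq]
              push_cast
              norm_num
              omega
            · by_cases hC : PySem.Chars.upperChar ch = 'C'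
              · rw [hC, show poolGlyphToColorId.get? 'C' = some (5 : Int) from by decide]
                change List.foldl _ [a, b, c, d, e, f + 1] cs = _
                rw [ih]
                simp only [List.cons.injEq]
                push_cast
                norm_num
                omega
              · have hnone : poolGlyphToColorId.get? (PySem.Chars.upperChar ch) = none := by
                  rw [PySem.Dict.get?_eq_none_iff_not_mem_keys,
                    show poolGlyphToColorId.keys = ['W', 'U', 'B', 'R', 'G', 'C'] from rfl]
                  simp [hW, hU, hB, hR, hG, hC]
                simp only [hnone]
                change List.foldl _ [a, b, c, d, e, f] cs = _
                rw [ih]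
                simp [hW, hU, hB, hR, hG, hC]

-- ===== VERDICT (by name: the statement is the Claim_ definition above) =====
theorem parse_mana_pool_py_spec : Claim_equal_parse_mana_pool_py := by
  intro pool _
  unfold Spec_parse_mana_pool_py parse_mana_pool_py parse_mana_pool_py_alt
  match pool with
  | none => rfl
  | some s =>
    by_cases hs : s.toList = []
    · simp [hs]
    · simp only [hs, if_false]
      rw [show (List.replicate 6 (0 : Int)) = [0, 0, 0, 0, 0, 0] from rfl, loopA_eq]
      rw [show PySem.Chars.upper s.toList = s.toList.map PySem.Chars.upperChar from rfl]
      simp
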